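-- pv_equiv track=rewrite | github.com/dKosarevsky/math_modelling | lab_02/numerical_integration.py | diff_polynoms
-- ===== SOURCE A (Python) =====
-- def diff_polynoms(pol1, pol2):
--     max_len = max(len(pol1), len(pol2))
--     res_pol = [0 for i in range(max_len)]
--
--     for i in range(len(pol1)):
--         res_pol[i + len(res_pol) - len(pol1)] += pol1[i]
--
--     for i in range(len(pol2)):
--         res_pol[i + len(res_pol) - len(pol2)] -= pol2[i]
--
--     return res_pol
-- ===== SOURCE B (Python) =====
-- from itertools import zip_longest
--
-- def diff_polynoms(pol1, pol2):
--     pairs = zip_longest(reversed(pol1), reversed(pol2), fillvalue=0)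
--     res = [a - b for a, b in pairs]
--     res.reverse()
--     return res
-- ===== Notes on version B (the rewrite author's own statement) =====
-- stated objective: idiomatic
-- what changed: Aligns the polynomials from their low-order ends with one zip_longest pass over the reversed lists (fill 0) and reverses the result, instead of allocating a zeroed array and running two separate offset-indexed accumulation loops.
import Mathlib
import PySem

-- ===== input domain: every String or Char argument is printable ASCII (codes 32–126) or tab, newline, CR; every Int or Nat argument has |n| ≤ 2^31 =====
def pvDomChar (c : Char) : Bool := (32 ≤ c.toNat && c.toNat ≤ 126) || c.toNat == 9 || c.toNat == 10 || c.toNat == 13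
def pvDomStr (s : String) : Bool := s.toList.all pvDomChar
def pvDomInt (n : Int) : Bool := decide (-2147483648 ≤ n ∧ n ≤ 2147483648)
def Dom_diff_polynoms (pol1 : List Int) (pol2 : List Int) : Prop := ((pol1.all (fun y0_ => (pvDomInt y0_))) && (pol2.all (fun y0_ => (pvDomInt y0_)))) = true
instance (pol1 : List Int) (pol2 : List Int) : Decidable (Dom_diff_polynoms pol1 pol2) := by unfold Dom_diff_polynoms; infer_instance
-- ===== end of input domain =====

-- B aligns the polynomials from their low-order ends with one zip_longest pass over the
-- reversed lists instead of A's zeroed array plus two offset-indexed accumulation loops.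

-- ===== PORT A =====
-- literal transliteration: zeroed list of max length, then two index loops that
-- accumulate pol1 (add) and pol2 (subtract) at tail-aligned offsets; indices are
-- always in range so Python's res_pol[idx] is the plain getElem!/set here (exact).
def diff_polynoms (pol1 : List Int) (pol2 : List Int) : List Int :=
  let max_len := max pol1.length pol2.length
  let res_pol : List Int := (List.range max_len).map (fun _ => (0 : Int))
  let res1 := (List.range pol1.length).foldl
    (fun res i => res.set (i + res.length - pol1.length)
      (res[i + res.length - pol1.length]! + pol1[i]!)) res_pol
  let res2 := (List.range pol2.length).foldl
    (fun res i => res.set (i + res.length - pol2.length)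
      (res[i + res.length - pol2.length]! - pol2[i]!)) res1
  res2

-- ===== PORT B =====
-- zip_longest(reversed(pol1), reversed(pol2), fillvalue=0) with a - b per pair (exact).
def zipSubLongest : List Int → List Int → List Int
  | [], [] => []
  | a :: as, [] => (a - 0) :: zipSubLongest as []
  | [], b :: bs => (0 - b) :: zipSubLongest [] bs
  | a :: as, b :: bs => (a - b) :: zipSubLongest as bs

def diff_polynoms_alt (pol1 : List Int) (pol2 : List Int) : List Int :=
  (zipSubLongest pol1.reverse pol2.reverse).reverse

-- ===== PRECONDITION & SPEC =====
def Spec_diff_polynoms (pol1 : List Int) (pol2 : List Int) (out : List Int) : Prop := out = diff_polynoms_alt pol1 pol2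
instance (pol1 : List Int) (pol2 : List Int) (out : List Int) : Decidable (Spec_diff_polynoms pol1 pol2 out) := by unfold Spec_diff_polynoms; infer_instance

-- ===== CLAIM (what is proved, stated in full; the proofs are below) =====
def Claim_equal_diff_polynoms : Prop := ∀ (pol1 : List Int) (pol2 : List Int), Dom_diff_polynoms pol1 pol2 → Spec_diff_polynoms pol1 pol2 (diff_polynoms pol1 pol2)

-- ===== LEMMAS AND PROOFS =====

-- the length of the loop state is preserved by each set
theorem pv_foldl_length (f : List Int → Nat → List Int)
    (h : ∀ r i, (f r i).length = r.length) :
    ∀ (L : List Nat) (res : List Int), (L.foldl f res).length = res.length := by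
  intro L
  induction L with
  | nil => intro res; rfl
  | cons x xs ih => intro res; simp [List.foldl, ih, h]

-- characterization of one of A's accumulation loops, pointwise
theorem pv_loop_get (upd : Int → Int → Int) (pol : List Int) :
    ∀ (n : Nat) (res : List Int), n ≤ pol.length → pol.length ≤ res.length →
    ∀ (j : Nat), j < res.length →
      ((List.range n).foldl
        (fun r i => r.set (i + r.length - pol.length)
          (upd r[i + r.length - pol.length]! pol[i]!)) res)[j]! =
      if res.length - pol.length ≤ j ∧ j < res.length - pol.length + n
      then upd res[j]! pol[j + pol.length - res.length]!
      else res[j]! := by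
  intro n
  induction n with
  | zero =>
    intro res hn hk j hj
    simp only [List.range_zero, List.foldl_nil]
    rw [if_neg]; omega
  | succ n ih =>
    intro res hn hk j hj
    rw [List.range_succ, List.foldl_append, List.foldl_cons, List.foldl_nil]
    set X := (List.range n).foldl
        (fun r i => r.set (i + r.length - pol.length)
          (upd r[i + r.length - pol.length]! pol[i]!)) res with hXdef
    have hX : X.length = res.length := by
      apply pv_foldl_length; intro r i; simp
    have hidx : n + X.length - pol.length < res.length := by omega
    have hj' : j < (X.set (n + X.length - pol.length)
        (upd X[n + X.length - pol.length]! pol[n]!)).length := by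
      simp [hX]; omega
    rw [getElem!_pos _ j hj', List.getElem_set]
    by_cases hcase : n + X.length - pol.length = j
    · rw [if_pos hcase]
      have hXidx : X[n + X.length - pol.length]! =
          res[n + X.length - pol.length]! := by
        rw [ih res (by omega) hk _ (by omega), if_neg]; omega
      have h1 : res.length - pol.length ≤ j ∧ j < res.length - pol.length + (n + 1) := by omega
      rw [if_pos h1, hXidx]
      have h2 : j + pol.length - res.length = n := by omega
      rw [hcase, h2]
    · rw [if_neg hcase, ← getElem!_pos X j (by omega),
        ih res (by omega) hk j hj]
      by_cases h1 : res.length - pol.length ≤ j ∧ j < res.length - pol.length + n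
      · rw [if_pos h1, if_pos (by omega)]
      · rw [if_neg h1, if_neg (by omega)]

theorem pv_zl_length : ∀ (xs ys : List Int),
    (zipSubLongest xs ys).length = max xs.length ys.length := by
  intro xs ys
  induction xs, ys using zipSubLongest.induct with
  | case1 => simp [zipSubLongest]
  | case2 a as ih => simp [zipSubLongest, ih]
  | case3 b bs ih => simp [zipSubLongest, ih]
  | case4 a as b bs ih => simp [zipSubLongest, ih]

theorem pv_zl_get : ∀ (xs ys : List Int) (j : Nat),
    (zipSubLongest xs ys)[j]! = xs.getD j 0 - ys.getD j 0 := by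
  intro xs ys
  induction xs, ys using zipSubLongest.induct with
  | case1 => intro j; simp [zipSubLongest, List.getD]
  | case2 a as ih =>
    intro j
    cases j with
    | zero => simp [zipSubLongest, List.getD]
    | succ j => simpa [zipSubLongest, List.getD] using ih j
  | case3 b bs ih =>
    intro j
    cases j with
    | zero => simp [zipSubLongest, List.getD]
    | succ j => simpa [zipSubLongest, List.getD] using ih j
  | case4 a as b bs ih =>
    intro j
    cases j with
    | zero => simp [zipSubLongest, List.getD]
    | succ j => simpa [zipSubLongest, List.getD] using ih j

-- reading a tail-aligned coefficient through the reversed list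
theorem pv_rev_getD (pol : List Int) (m i : Nat) (hk : pol.length ≤ m) (hi : i < m) :
    pol.reverse.getD (m - 1 - i) 0 =
      if m - pol.length ≤ i then pol[i + pol.length - m]! else 0 := by
  by_cases h : m - pol.length ≤ i ∧ 0 < pol.length
  · rw [if_pos h.1]
    have hlt : m - 1 - i < pol.reverse.length := by simp; omega
    rw [List.getD_eq_getElem _ _ hlt, List.getElem_reverse]
    have hlt2 : i + pol.length - m < pol.length := by omega
    rw [getElem!_pos pol _ hlt2]
    congr 1
    omega
  · have hlen : pol.reverse.length ≤ m - 1 - i ∨ pol.length = 0 := by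
      simp; omega
    rcases hlen with hlen | hlen
    · rw [List.getD_eq_default _ _ hlen, if_neg]
      omega
    · have : pol = [] := List.length_eq_zero_iff.mp hlen
      subst this
      rw [if_neg (by omega)]
      simp [List.getD]

-- ===== VERDICT (by name: the statement is the Claim_ definition above) =====
theorem diff_polynoms_spec : Claim_equal_diff_polynoms := by
  intro pol1 pol2 _
  unfold Spec_diff_polynoms diff_polynoms diff_polynoms_alt
  dsimp only
  set m := max pol1.length pol2.length with hm
  set res0 : List Int := (List.range m).map (fun _ => (0 : Int)) with hres0
  set res1 := (List.range pol1.length).foldl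
    (fun res i => res.set (i + res.length - pol1.length)
      (res[i + res.length - pol1.length]! + pol1[i]!)) res0 with hres1
  set res2 := (List.range pol2.length).foldl
    (fun res i => res.set (i + res.length - pol2.length)
      (res[i + res.length - pol2.length]! - pol2[i]!)) res1 with hres2
  have h0len : res0.length = m := by simp [hres0]
  have h1len : res1.length = m := by
    rw [hres1, pv_foldl_length _ (by intro r i; simp), h0len]
  have h2len : res2.length = m := by
    rw [hres2, pv_foldl_length _ (by intro r i; simp), h1len]
  have hBlen : ((zipSubLongest pol1.reverse pol2.reverse).reverse).length = m := by
    simp [pv_zl_length]; omega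
  have hk1 : pol1.length ≤ m := le_max_left _ _
  have hk2 : pol2.length ≤ m := le_max_right _ _
  apply List.ext_getElem (by omega)
  intro i hi1 hi2
  have hi : i < m := by omega
  -- left side: the two accumulation loops, characterized pointwise
  have h0get : res0[i]! = 0 := by
    rw [getElem!_pos res0 i (by omega)]
    simp [hres0]
  have h1get : res1[i]! =
      if m - pol1.length ≤ i then pol1[i + pol1.length - m]! else 0 := by
    rw [hres1, pv_loop_get HAdd.hAdd pol1 pol1.length res0 le_rfl (by omega) i (by omega)]
    rw [h0len]
    by_cases h : m - pol1.length ≤ i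
    · rw [if_pos ⟨h, by omega⟩, if_pos h, h0get]; simp
    · rw [if_neg (by omega), if_neg h, h0get]
  have h2get : res2[i]! =
      (if m - pol1.length ≤ i then pol1[i + pol1.length - m]! else 0) -
      (if m - pol2.length ≤ i then pol2[i + pol2.length - m]! else 0) := by
    rw [hres2, pv_loop_get HSub.hSub pol2 pol2.length res1 le_rfl (by omega) i (by omega)]
    rw [h1len]
    by_cases h : m - pol2.length ≤ i
    · rw [if_pos ⟨h, by omega⟩, h1get, if_pos h]
    · rw [if_neg (by omega), if_neg h, h1get]; simp
  -- right side: reversed zip_longest, characterized pointwise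
  have hBget : ((zipSubLongest pol1.reverse pol2.reverse).reverse)[i]! =
      (if m - pol1.length ≤ i then pol1[i + pol1.length - m]! else 0) -
      (if m - pol2.length ≤ i then pol2[i + pol2.length - m]! else 0) := by
    rw [getElem!_pos _ i (by omega), List.getElem_reverse,
      ← getElem!_pos _ _ (by simp [pv_zl_length] at hBlen ⊢; omega), pv_zl_get]
    have hzl : (zipSubLongest pol1.reverse pol2.reverse).length = m := by
      simp [pv_zl_length]; omega
    rw [hzl, pv_rev_getD pol1 m i hk1 hi, pv_rev_getD pol2 m i hk2 hi]
  rw [← getElem!_pos res2 i (by omega), ← getElem!_pos _ i (by omega), h2get, hBget]
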